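-- pv_equiv track=rewrite | github.com/devyan0/Study_Algorithm_Python | 프로그래머스/억억단을외우자2.py | solution
-- ===== SOURCE A (Python) =====
-- from collections import defaultdict
-- from bisect import bisect_left as bisect
--
-- def solution(e, starts):
--
--     d = defaultdict(list)
--
--     cnt = [1] * (e+1)
--     for i in range(2, e+1):
--         for j in range(i, e+1, i):
--             cnt[j] += 1
--
--     for i in range(1, e+1):
--         c = cnt[i]
--         d[c].append(i)
--
--     keyset = sorted(d.keys(), reverse=True)
--     res = []
--     for s in starts:
--         for k in keyset:
--             idx = bisect(d[k], s)
--             if idx == len(d[k]): continue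
--             res.append(d[k][idx])
--             break
--
--
--     return res
-- ===== SOURCE B (Python) =====
-- def solution(e, starts):
--     cnt = [1] * (e + 1)
--     for i in range(2, e + 1):
--         for j in range(i, e + 1, i):
--             cnt[j] += 1
--     # best[i] = the smallest number in [i, e] with the maximal divisor count there
--     best = [0] * (e + 1)
--     b = e
--     for i in range(e, 0, -1):
--         if cnt[i] >= cnt[b]:
--             b = i
--         best[i] = b
--     res = []
--     for s in starts:
--         t = 1 if s < 1 else s
--         if t <= e:
--             res.append(best[t])
--     return res
-- ===== Notes on version B (the rewrite author's own statement) =====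
-- stated objective: faster
-- what changed: A answers each query by scanning all distinct divisor-counts in descending order with a bisect into each count-class; B computes one backward suffix-best pass over [1,e] after the same sieve, so each query becomes a single O(1) dictionary lookup.
import Mathlib
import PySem

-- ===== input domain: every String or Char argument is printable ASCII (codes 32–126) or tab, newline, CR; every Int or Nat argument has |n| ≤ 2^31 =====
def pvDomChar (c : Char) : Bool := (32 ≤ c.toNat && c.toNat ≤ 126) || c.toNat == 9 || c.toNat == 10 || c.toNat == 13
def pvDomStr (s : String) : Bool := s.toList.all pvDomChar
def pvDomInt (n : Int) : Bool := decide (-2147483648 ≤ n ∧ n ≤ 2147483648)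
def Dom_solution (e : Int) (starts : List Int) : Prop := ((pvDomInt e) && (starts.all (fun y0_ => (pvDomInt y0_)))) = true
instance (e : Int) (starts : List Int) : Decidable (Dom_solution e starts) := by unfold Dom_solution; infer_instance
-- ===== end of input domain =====

-- B replaces A's per-query scan over the sorted count-classes (with a bisect in each class) by a
-- single backward suffix-best pass after the divisor-count sieve both versions share, answering
-- each query by one dictionary lookup (objective: faster).

-- ===== PORT A =====
-- the divisor-count sieve 'cnt' = [1]*(e+1) then cnt[j] += 1 (identical lines in A and in B, hence one
-- shared helper). Python lists are dynamic arrays; cnt is kept as an Array so the port evaluates in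
-- the same O(1)-per-access way. Indices i, j read or written here lie in [1, e], so indexing is exact.
def pvCnt (e : Int) : Array Int :=
  let cnt := Array.replicate (e + 1).toNat (1 : Int)
  (PySem.List.pyRange 2 (e + 1) 1).foldl
    (fun cnt i =>
      (PySem.List.pyRange i (e + 1) i).foldl
        (fun (cnt : Array Int) j => cnt.set! j.toNat (cnt.getD j.toNat 0 + 1)) cnt) cnt

-- A's inner 'for k in keyset: … continue / append; break' loop, as a recursion returning Option
def pvFindA (d : PySem.Dict Int (Array Int)) (s : Int) : List Int → Option Int
  | [] => none
  | k :: ks =>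
    let lst := (d.getD k #[]).toList
    let idx := PySem.List.bisectLeft lst s
    if idx = lst.length then pvFindA d s ks
    else some (lst.getD idx 0)      -- idx < len(lst) here, so getD indexing is exact

def solution (e : Int) (starts : List Int) : List Int :=
  let cnt := pvCnt e
  -- d[c].append(i): the per-count classes, like every Python list, are arrays built by push
  let d := (PySem.List.pyRange 1 (e + 1) 1).foldl
      (fun d i => d.modify (cnt.getD i.toNat 0) #[] (fun l => l.push i))
      PySem.Dict.empty
  let keyset := PySem.List.sorted d.keys (fun x => x) true
  starts.foldl (fun res s =>
    match pvFindA d s keyset with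
    | some x => res ++ [x]
    | none => res) []

-- ===== PORT B =====
def solution_alt (e : Int) (starts : List Int) : List Int :=
  let cnt := pvCnt e
  -- best = [0]*(e+1) as an Array; b and the write index i both lie in [1, e], so indexing is exact
  let st := (PySem.List.pyRange e 0 (-1)).foldl
      (fun (p : Int × Array Int) i =>
        let b := if cnt.getD p.1.toNat 0 ≤ cnt.getD i.toNat 0 then i else p.1
        (b, p.2.set! i.toNat b))
      (e, Array.replicate (e + 1).toNat (0 : Int))
  starts.foldl (fun res s =>
    let t := if s < 1 then 1 else s
    if t ≤ e then res ++ [st.2.getD t.toNat 0] else res) []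

-- ===== PRECONDITION & SPEC =====
def Spec_solution (e : Int) (starts : List Int) (out : List Int) : Prop := out = solution_alt e starts
instance (e : Int) (starts : List Int) (out : List Int) : Decidable (Spec_solution e starts out) := by unfold Spec_solution; infer_instance

-- ===== CLAIM (what is proved, stated in full; the proofs are below) =====
def Claim_equal_solution : Prop := ∀ (e : Int) (starts : List Int), Dom_solution e starts → Spec_solution e starts (solution e starts)

-- ===== LEMMAS AND PROOFS =====

-- cnt[i], as both Pythons read it
def pvC (cnt : Array Int) (i : Int) : Int := cnt.getD i.toNat 0

-- A's grouping dict d : count ↦ numbers with that count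
def pvDA (cnt : Array Int) (e : Int) : PySem.Dict Int (Array Int) :=
  (PySem.List.pyRange 1 (e + 1) 1).foldl
    (fun d i => d.modify (pvC cnt i) #[] (fun l => l.push i)) PySem.Dict.empty

-- A's keyset: the distinct counts, sorted in descending order
def pvKeyset (cnt : Array Int) (e : Int) : List Int :=
  PySem.List.sorted ((pvDA cnt e).keys) (fun x => x) true

-- the candidate numbers of a query s: the integers in [max 1 s, e]
def pvCand (e s : Int) : List Int := PySem.List.pyRange (max 1 s) (e + 1) 1

-- B's suffix best value: the answer for the query window [i, e]
def pvBB (cnt : Array Int) (e i : Int) : Int :=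
  if h : e ≤ i then e
  else if pvC cnt (pvBB cnt e (i + 1)) ≤ pvC cnt i then i else pvBB cnt e (i + 1)
termination_by (e - i).toNat
decreasing_by omega

-- proof-side normal form of A's query loop: first nonempty count-class, first element ≥ s
def pvScan (cnt : Array Int) (cand : List Int) : List Int → Option Int
  | [] => none
  | k :: ks =>
    match (cand.filter (fun i => pvC cnt i == k)).head? with
    | some m => some m
    | none => pvScan cnt cand ks

-- "m is the answer for candidate list cand": member, maximal count, smallest among ties
def pvBest (cnt : Array Int) (cand : List Int) (m : Int) : Prop :=
  m ∈ cand ∧ ∀ j ∈ cand, pvC cnt j < pvC cnt m ∨ (pvC cnt j = pvC cnt m ∧ m ≤ j)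

theorem pvBest_unique {cnt : Array Int} {cand : List Int} {m m' : Int}
    (h : pvBest cnt cand m) (h' : pvBest cnt cand m') : m = m' := by
  obtain ⟨hm, hmax⟩ := h
  obtain ⟨hm', hmax'⟩ := h'
  rcases hmax m' hm' with h1 | h1 <;> rcases hmax' m hm with h2 | h2 <;> omega

theorem pv_getD_foldl (cnt : Array Int) (l : List Int) (d : PySem.Dict Int (Array Int)) (k : Int) :
    ((l.foldl (fun d i => d.modify (pvC cnt i) #[] (fun l => l.push i)) d).getD k #[]).toList
      = (d.getD k #[]).toList ++ l.filter (fun i => pvC cnt i == k) := by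
  induction l generalizing d with
  | nil => simp
  | cons x xs ih =>
    simp only [List.foldl_cons, ih, List.filter_cons]
    rw [PySem.Dict.getD_modify]
    by_cases h : pvC cnt x = k
    · simp [h]
    · simp [h, Ne.symm h]

theorem pvDA_getD (cnt : Array Int) (e k : Int) :
    ((pvDA cnt e).getD k #[]).toList = (PySem.List.pyRange 1 (e + 1) 1).filter (fun i => pvC cnt i == k) := by
  unfold pvDA; rw [pv_getD_foldl]; simp

theorem pvDA_keys (cnt : Array Int) (e : Int) :
    (pvDA cnt e).keys = PySem.Set.ofList ((PySem.List.pyRange 1 (e + 1) 1).map (pvC cnt)) := by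
  unfold pvDA
  rw [PySem.Dict.keys_foldl_modify_key]
  simp [PySem.Set.update, PySem.Set.ofList_eq_foldl, PySem.Dict.keys_empty]

theorem pvDA_nodup (cnt : Array Int) (e : Int) : (pvDA cnt e).keys.Nodup := by
  unfold pvDA
  exact PySem.Dict.nodup_keys_foldl_modify_key _ _ _ _ _ PySem.Dict.nodup_keys_empty

theorem pv_step_eq (lst : List Int) (s : Int) (hs : lst.Pairwise (· < ·)) :
    (if PySem.List.bisectLeft lst s = lst.length then none
     else some (lst.getD (PySem.List.bisectLeft lst s) 0))
      = lst.find? (fun x => decide (s ≤ x)) := by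
  obtain ⟨hle, hlt, hge⟩ := PySem.List.bisectLeft_spec lst s (hs.imp le_of_lt)
  set idx := PySem.List.bisectLeft lst s with hidx
  by_cases h : idx = lst.length
  · rw [if_pos h]
    symm
    rw [List.find?_eq_none]
    intro x hx
    obtain ⟨j, hj, rfl⟩ := List.mem_iff_getElem.mp hx
    simp only [decide_eq_true_eq, not_le]
    exact hlt j hj (h ▸ hj)
  · rw [if_neg h]
    have hidxlt : idx < lst.length := lt_of_le_of_ne hle h
    symm
    apply List.find?_eq_some_iff_getElem.mpr
    have hgd : lst.getD idx 0 = lst[idx] := by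
      rw [List.getD_eq_getElem?_getD, List.getElem?_eq_getElem hidxlt]; rfl
    refine ⟨by rw [hgd]; simpa using hge idx hidxlt le_rfl, idx, hidxlt, hgd.symm, ?_⟩
    intro j hj
    simp only [Bool.not_eq_eq_eq_not, Bool.not_true, decide_eq_false_iff_not, not_le]
    exact hlt j (lt_trans hj hidxlt) hj

theorem pv_range_filter (e s : Int) :
    (PySem.List.pyRange 1 (e + 1) 1).filter (fun x => decide (s ≤ x))
      = PySem.List.pyRange (max 1 s) (e + 1) 1 := by
  by_cases h1 : s ≤ 1
  · rw [max_eq_left h1, List.filter_eq_self.mpr]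
    intro x hx
    have := (PySem.List.mem_pyRange_one).mp hx
    simp; omega
  · rw [max_eq_right (le_of_lt (not_le.mp h1))]
    by_cases h2 : s ≤ e + 1
    · rw [PySem.List.pyRange_one_append 1 s (e+1) (by omega) h2, List.filter_append,
        List.filter_eq_nil_iff.mpr, List.filter_eq_self.mpr, List.nil_append]
      · intro x hx; have := (PySem.List.mem_pyRange_one).mp hx; simp; omega
      · intro x hx; have := (PySem.List.mem_pyRange_one).mp hx; simp; omega
    · have hr : PySem.List.pyRange s (e + 1) 1 = [] := PySem.List.pyRange_one_eq_nil (by omega)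
      rw [hr, List.filter_eq_nil_iff]
      intro x hx; have := (PySem.List.mem_pyRange_one).mp hx; simp; omega

theorem pvFindA_eq_pvScan (cnt : Array Int) (e s : Int) (ks : List Int) :
    pvFindA (pvDA cnt e) s ks = pvScan cnt (pvCand e s) ks := by
  induction ks with
  | nil => rfl
  | cons k ks ih =>
    show (if PySem.List.bisectLeft (((pvDA cnt e).getD k #[]).toList) s = (((pvDA cnt e).getD k #[]).toList).length
          then pvFindA (pvDA cnt e) s ks
          else some ((((pvDA cnt e).getD k #[]).toList).getD (PySem.List.bisectLeft (((pvDA cnt e).getD k #[]).toList) s) 0))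
        = pvScan cnt (pvCand e s) (k :: ks)
    have hsorted : (((pvDA cnt e).getD k #[]).toList).Pairwise (· < ·) := by
      rw [pvDA_getD]
      exact (PySem.List.pairwise_lt_pyRange_one 1 (e+1)).filter _
    have hstep := pv_step_eq (((pvDA cnt e).getD k #[]).toList) s hsorted
    have hfilter : (((pvDA cnt e).getD k #[]).toList).find? (fun x => decide (s ≤ x))
        = ((pvCand e s).filter (fun i => pvC cnt i == k)).head? := by
      rw [← List.head?_filter, pvDA_getD, List.filter_comm, pv_range_filter]; rfl
    rw [hfilter] at hstep
    by_cases hc : PySem.List.bisectLeft (((pvDA cnt e).getD k #[]).toList) s = (((pvDA cnt e).getD k #[]).toList).length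
    · rw [if_pos hc, ih]
      rw [if_pos hc] at hstep
      conv_rhs => rw [pvScan]
      rw [← hstep]
    · rw [if_neg hc]
      rw [if_neg hc] at hstep
      conv_rhs => rw [pvScan]
      rw [← hstep]

theorem pvKeyset_desc (cnt : Array Int) (e : Int) :
    (pvKeyset cnt e).Pairwise (fun a b => b < a) := by
  have h1 : (pvKeyset cnt e).Pairwise (fun a b : Int => b ≤ a) :=
    PySem.List.sorted_pairwise_rev _ _
  have h2 : (pvKeyset cnt e).Nodup :=
    ((PySem.List.sorted_perm _ _ _).nodup_iff).mpr (pvDA_nodup cnt e)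
  exact (h1.and h2).imp (fun h => lt_of_le_of_ne h.1 (Ne.symm h.2))

theorem pvKeyset_cover (cnt : Array Int) (e s : Int) :
    ∀ j ∈ pvCand e s, pvC cnt j ∈ pvKeyset cnt e := by
  intro j hj
  have hj' := (PySem.List.mem_pyRange_one).mp hj
  rw [pvKeyset, PySem.List.mem_sorted, pvDA_keys, PySem.Set.mem_ofList]
  exact List.mem_map_of_mem (by rw [PySem.List.mem_pyRange_one]; omega)

theorem pvScan_none {cnt : Array Int} {cand : List Int} {ks : List Int}
    (hcover : ∀ j ∈ cand, pvC cnt j ∈ ks) (h : pvScan cnt cand ks = none) : cand = [] := by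
  induction ks with
  | nil =>
    cases cand with
    | nil => rfl
    | cons x xs => exact absurd (hcover x (by simp)) (by simp)
  | cons k ks ih =>
    rw [pvScan] at h
    cases hh : (cand.filter (fun i => pvC cnt i == k)).head? with
    | some m => rw [hh] at h; exact absurd h (by simp)
    | none =>
      rw [hh] at h
      have hemp : cand.filter (fun i => pvC cnt i == k) = [] := by
        cases hcc : cand.filter (fun i => pvC cnt i == k) with
        | nil => rfl
        | cons a b => rw [hcc] at hh; simp at hh
      refine ih (fun j hj => ?_) h
      rcases List.mem_cons.mp (hcover j hj) with hk | hks
      · exfalso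
        have : j ∈ cand.filter (fun i => pvC cnt i == k) := by
          rw [List.mem_filter]; exact ⟨hj, by simp [hk]⟩
        rw [hemp] at this; simp at this
      · exact hks

theorem pvScan_some {cnt : Array Int} {cand : List Int} {ks : List Int} {m : Int}
    (hdesc : ks.Pairwise (fun a b => b < a))
    (hcover : ∀ j ∈ cand, pvC cnt j ∈ ks)
    (hsorted : cand.Pairwise (· < ·))
    (h : pvScan cnt cand ks = some m) : pvBest cnt cand m := by
  induction ks with
  | nil => simp [pvScan] at h
  | cons k ks ih =>
    rw [pvScan] at h
    cases hh : (cand.filter (fun i => pvC cnt i == k)).head? with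
    | none =>
      rw [hh] at h
      have hemp : cand.filter (fun i => pvC cnt i == k) = [] := by
        cases hcc : cand.filter (fun i => pvC cnt i == k) with
        | nil => rfl
        | cons a b => rw [hcc] at hh; simp at hh
      refine ih hdesc.of_cons (fun j hj => ?_) h
      rcases List.mem_cons.mp (hcover j hj) with hk | hks
      · exfalso
        have : j ∈ cand.filter (fun i => pvC cnt i == k) := by
          rw [List.mem_filter]; exact ⟨hj, by simp [hk]⟩
        rw [hemp] at this; simp at this
      · exact hks
    | some m' =>
      rw [hh] at h
      simp only [Option.some.injEq] at h
      subst h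
      obtain ⟨rest, hrest⟩ := List.head?_eq_some_iff.mp hh
      have hmfil : m' ∈ cand.filter (fun i => pvC cnt i == k) := by rw [hrest]; simp
      have hmc : m' ∈ cand := (List.mem_filter.mp hmfil).1
      have hmk : pvC cnt m' = k := by simpa using (List.mem_filter.mp hmfil).2
      refine ⟨hmc, fun j hj => ?_⟩
      by_cases hjk : pvC cnt j = k
      · right
        refine ⟨by rw [hjk, hmk], ?_⟩
        have hjfil : j ∈ cand.filter (fun i => pvC cnt i == k) := by
          rw [List.mem_filter]; exact ⟨hj, by simp [hjk]⟩
        rw [hrest] at hjfil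
        rcases List.mem_cons.mp hjfil with rfl | hjr
        · exact le_rfl
        · have hpf : (cand.filter (fun i => pvC cnt i == k)).Pairwise (· < ·) := hsorted.filter _
          rw [hrest] at hpf
          exact le_of_lt ((List.pairwise_cons.mp hpf).1 j hjr)
      · left
        rw [hmk]
        rcases List.mem_cons.mp (hcover j hj) with hk | hks
        · exact absurd hk hjk
        · exact (List.pairwise_cons.mp hdesc).1 _ hks

theorem pvScan_nil (cnt : Array Int) (ks : List Int) : pvScan cnt [] ks = none := by
  induction ks with
  | nil => rfl
  | cons k ks ih => rw [pvScan]; simpa using ih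

theorem pvBB_best (cnt : Array Int) (e : Int) :
    ∀ (n : Nat) (t : Int), e - t = n → 1 ≤ t → t ≤ e →
      pvBest cnt (PySem.List.pyRange t (e + 1) 1) (pvBB cnt e t) := by
  intro n
  induction n with
  | zero =>
    intro t h0 h1 h2
    have hte : t = e := by omega
    subst hte
    rw [pvBB, dif_pos le_rfl, PySem.List.pyRange_one_singleton]
    exact ⟨by simp, by intro j hj; simp at hj; subst hj; right; exact ⟨rfl, le_rfl⟩⟩
  | succ n ih =>
    intro t h0 h1 h2
    have htlt : t < e := by omega
    have hb := ih (t + 1) (by omega) (by omega) (by omega)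
    rw [PySem.List.pyRange_one_cons (by omega : t < e + 1)]
    rw [pvBB, dif_neg (by omega : ¬ e ≤ t)]
    obtain ⟨hbmem, hbmax⟩ := hb
    have hbm : t + 1 ≤ pvBB cnt e (t + 1) := by
      have := (PySem.List.mem_pyRange_one).mp hbmem; omega
    by_cases hc : pvC cnt (pvBB cnt e (t + 1)) ≤ pvC cnt t
    · rw [if_pos hc]
      refine ⟨by simp, fun j hj => ?_⟩
      rcases List.mem_cons.mp hj with rfl | hj'
      · right; exact ⟨rfl, le_rfl⟩
      · have hjt : t + 1 ≤ j := by have := (PySem.List.mem_pyRange_one).mp hj'; omega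
        rcases hbmax j hj' with h' | ⟨h'e, h'le⟩
        · left; exact lt_of_lt_of_le h' hc
        · by_cases he : pvC cnt j = pvC cnt t
          · right; exact ⟨he, by omega⟩
          · left; exact lt_of_le_of_ne (h'e ▸ hc) he
    · rw [if_neg hc]
      refine ⟨List.mem_cons_of_mem _ hbmem, fun j hj => ?_⟩
      rcases List.mem_cons.mp hj with rfl | hj'
      · left; omega
      · exact hbmax j hj'

theorem pv_arr_size_set (a : Array Int) (i : Nat) (v : Int) : (a.set! i v).size = a.size := by
  simp

theorem pv_arr_getD_set_self (a : Array Int) (i : Nat) (v : Int) (h : i < a.size) :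
    (a.set! i v).getD i 0 = v := by
  simp [Array.getD, h]

theorem pv_arr_getD_set_ne (a : Array Int) (i j : Nat) (v : Int) (h : i ≠ j) :
    (a.set! i v).getD j 0 = a.getD j 0 := by
  by_cases hj : j < a.size
  · simp only [Array.set!_eq_setIfInBounds, Array.getD, Array.size_setIfInBounds, hj, dif_pos]
    exact Array.getElem_setIfInBounds_ne hj h
  · simp [Array.getD, hj]

theorem pvFold_inv (cnt : Array Int) (e : Int) :
    ∀ (n : Nat) (t : Int), e - t = n → 1 ≤ t → t ≤ e →
      (((PySem.List.pyRange e (t - 1) (-1)).foldl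
          (fun (p : Int × Array Int) i =>
            let b := if pvC cnt p.1 ≤ pvC cnt i then i else p.1
            (b, p.2.set! i.toNat b))
          (e, Array.replicate (e + 1).toNat (0 : Int))).1 = pvBB cnt e t)
      ∧ (((PySem.List.pyRange e (t - 1) (-1)).foldl
          (fun (p : Int × Array Int) i =>
            let b := if pvC cnt p.1 ≤ pvC cnt i then i else p.1
            (b, p.2.set! i.toNat b))
          (e, Array.replicate (e + 1).toNat (0 : Int))).2.size = (e + 1).toNat)
      ∧ (∀ x : Int, t ≤ x → x ≤ e → ((PySem.List.pyRange e (t - 1) (-1)).foldl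
          (fun (p : Int × Array Int) i =>
            let b := if pvC cnt p.1 ≤ pvC cnt i then i else p.1
            (b, p.2.set! i.toNat b))
          (e, Array.replicate (e + 1).toNat (0 : Int))).2.getD x.toNat 0 = pvBB cnt e x) := by
  intro n
  induction n with
  | zero =>
    intro t h0 h1 h2
    have hte : t = e := by omega
    subst hte
    rw [PySem.List.pyRange_neg_one_cons (by omega), PySem.List.pyRange_neg_one_eq_nil (by omega)]
    simp only [List.foldl_cons, List.foldl_nil]
    have hbbt : pvBB cnt t t = t := by rw [pvBB, dif_pos le_rfl]
    refine ⟨by simp [hbbt], by simp, ?_⟩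
    intro x hx1 hx2
    have hxe : x = t := by omega
    subst hxe
    rw [if_pos le_rfl, pv_arr_getD_set_self _ _ _ (by simp; omega), hbbt]
  | succ n ih =>
    intro t h0 h1 h2
    have htlt : t < e := by omega
    obtain ⟨ih1, ih2, ih3⟩ := ih (t + 1) (by omega) (by omega) (by omega)
    have hsplit : PySem.List.pyRange e (t - 1) (-1) = PySem.List.pyRange e t (-1) ++ [t] := by
      rw [PySem.List.pyRange_neg_one_eq_reverse, PySem.List.pyRange_neg_one_eq_reverse,
        show t - 1 + 1 = t from by omega,
        PySem.List.pyRange_one_cons (by omega : t < e + 1), List.reverse_cons]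
    have hts : t + 1 - 1 = t := by omega
    rw [hts] at ih1 ih2 ih3
    rw [hsplit, List.foldl_append]
    simp only [List.foldl_cons, List.foldl_nil]
    rw [ih1]
    have hbbt : (if pvC cnt (pvBB cnt e (t+1)) ≤ pvC cnt t then t else pvBB cnt e (t+1)) = pvBB cnt e t := by
      conv_rhs => rw [pvBB]
      rw [dif_neg (by omega : ¬ e ≤ t)]
    refine ⟨hbbt, by rw [pv_arr_size_set, ih2], ?_⟩
    intro x hx1 hx2
    by_cases hx : x = t
    · subst hx
      rw [pv_arr_getD_set_self _ _ _ (by rw [ih2]; omega), hbbt]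
    · rw [pv_arr_getD_set_ne _ _ _ _ (by omega)]
      exact ih3 x (by omega) hx2

theorem pvF_eq (cnt : Array Int) (e s : Int) :
    pvFindA (pvDA cnt e) s (pvKeyset cnt e)
      = if max 1 s ≤ e then some (pvBB cnt e (max 1 s)) else none := by
  rw [pvFindA_eq_pvScan]
  by_cases h : max 1 s ≤ e
  · rw [if_pos h]
    cases hres : pvScan cnt (pvCand e s) (pvKeyset cnt e) with
    | none =>
      exfalso
      have hnil := pvScan_none (pvKeyset_cover cnt e s) hres
      have : max 1 s ∈ pvCand e s := by
        rw [pvCand, PySem.List.mem_pyRange_one]; omega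
      rw [hnil] at this; simp at this
    | some m =>
      have hbest := pvScan_some (pvKeyset_desc cnt e) (pvKeyset_cover cnt e s)
        (PySem.List.pairwise_lt_pyRange_one _ _) hres
      have hbest' : pvBest cnt (pvCand e s) (pvBB cnt e (max 1 s)) :=
        pvBB_best cnt e (e - max 1 s).toNat (max 1 s) (by omega) (by omega) h
      rw [pvBest_unique hbest hbest']
  · rw [if_neg h]
    have hnil : pvCand e s = [] := PySem.List.pyRange_one_eq_nil (by omega)
    rw [hnil, pvScan_nil]

theorem pv_main (e : Int) (starts : List Int) : solution e starts = solution_alt e starts := by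
  show starts.foldl (fun res s =>
      match pvFindA (pvDA (pvCnt e) e) s (pvKeyset (pvCnt e) e) with
      | some x => res ++ [x]
      | none => res) []
    = starts.foldl (fun res s =>
      let t := if s < 1 then 1 else s
      if t ≤ e then
        res ++ [((PySem.List.pyRange e 0 (-1)).foldl
            (fun (p : Int × Array Int) i =>
              let b := if pvC (pvCnt e) p.1 ≤ pvC (pvCnt e) i then i else p.1
              (b, p.2.set! i.toNat b))
            (e, Array.replicate (e + 1).toNat (0 : Int))).2.getD t.toNat 0]
      else res) []
  have hbody : ∀ (res : List Int) (s : Int),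
      (match pvFindA (pvDA (pvCnt e) e) s (pvKeyset (pvCnt e) e) with
       | some x => res ++ [x]
       | none => res)
      = (let t := if s < 1 then 1 else s
         if t ≤ e then
           res ++ [((PySem.List.pyRange e 0 (-1)).foldl
               (fun (p : Int × Array Int) i =>
                 let b := if pvC (pvCnt e) p.1 ≤ pvC (pvCnt e) i then i else p.1
                 (b, p.2.set! i.toNat b))
               (e, Array.replicate (e + 1).toNat (0 : Int))).2.getD t.toNat 0]
         else res) := by
    intro res s
    have ht : (if s < 1 then 1 else s) = max 1 s := by
      split_ifs with h <;> omega
    rw [pvF_eq]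
    simp only [ht]
    by_cases hse : max 1 s ≤ e
    · obtain ⟨_, _, hg⟩ := pvFold_inv (pvCnt e) e (e - 1).toNat 1 (by omega) le_rfl (by omega)
      rw [show (1 : Int) - 1 = 0 from rfl] at hg
      rw [if_pos hse, if_pos hse, hg (max 1 s) (le_max_left _ _) hse]
    · rw [if_neg hse, if_neg hse]
  exact List.foldl_ext _ _ [] (fun acc x _ => hbody acc x)

-- ===== VERDICT (by name: the statement is the Claim_ definition above) =====
theorem solution_spec : Claim_equal_solution := by
  unfold Claim_equal_solution Spec_solution
  exact fun e starts _ => pv_main e starts
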